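-- pv_equiv track=rewrite | github.com/gspain89/oracle-openclaw | server/python/normalize.py | resolve_model_id
-- ===== SOURCE A (Python) =====
-- def resolve_model_id(raw_model: str, registry: dict) -> str | None:
--     """결과 JSON의 model 필드를 models.json ID로 해석 (suffix 매칭)
--
--     provider 접두어 하드코딩 없이 registry 키 대상으로 매칭한다.
--     가장 긴 매칭을 선택하여 오탐 방지.
--     반환: 매칭된 registry ID, 또는 None (미등록 모델)
--     """
--     if raw_model in registry:
--         return raw_model
--     best = None
--     for reg_id in registry:
--         if raw_model.endswith(reg_id):
--             prefix_len = len(raw_model) - len(reg_id)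
--             if prefix_len == 0 or raw_model[prefix_len - 1] == "/":
--                 if best is None or len(reg_id) > len(best):
--                     best = reg_id
--     return best
-- ===== SOURCE B (Python) =====
-- def resolve_model_id(raw_model: str, registry: dict) -> str | None:
--     """Same result as A: exact key, else the longest registry key that is a
--     '/'-boundary suffix of raw_model.  Instead of scanning every registry key,
--     scan raw_model's '/' positions left to right (longest suffix first) and
--     return the first suffix that is a registry key."""
--     if raw_model in registry:
--         return raw_model
--     for i, ch in enumerate(raw_model):
--         if ch == "/":
--             cand = raw_model[i + 1:]
--             if cand in registry:
--                 return cand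
--     return None
-- ===== Notes on version B (the rewrite author's own statement) =====
-- stated objective: alternative
-- what changed: Instead of scanning every registry key and keeping the longest '/'-boundary suffix match, B enumerates raw_model's '/' positions left to right and returns the first suffix that is a registry key (the leftmost '/' gives the longest suffix), so the loop runs over the model string instead of over the registry.
import Mathlib
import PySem

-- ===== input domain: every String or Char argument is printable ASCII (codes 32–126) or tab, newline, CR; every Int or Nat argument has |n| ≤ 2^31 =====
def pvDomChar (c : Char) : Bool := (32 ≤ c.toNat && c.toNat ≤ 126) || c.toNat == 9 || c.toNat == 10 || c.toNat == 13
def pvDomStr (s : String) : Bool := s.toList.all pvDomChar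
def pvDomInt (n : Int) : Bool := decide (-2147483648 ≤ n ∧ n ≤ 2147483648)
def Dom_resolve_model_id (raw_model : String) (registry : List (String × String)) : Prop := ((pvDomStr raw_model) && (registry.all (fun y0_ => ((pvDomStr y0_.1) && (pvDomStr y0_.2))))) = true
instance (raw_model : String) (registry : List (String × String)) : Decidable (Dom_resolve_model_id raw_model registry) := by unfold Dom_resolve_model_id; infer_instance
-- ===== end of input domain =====

-- B replaces A's scan over all registry keys by a left-to-right scan of raw_model's '/'
-- positions with one dict lookup per '/'-boundary suffix (leftmost '/' = longest suffix):
-- a different traversal of the same matching problem, independent of the registry size.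

-- ===== PORT A =====
-- A's loop body, named so the proofs can speak about one fold step.
def pvStepA (raw_model : String) (best : Option String) (reg_id : String) : Option String :=
  if PySem.Str.endswith raw_model reg_id then
    let prefix_len := PySem.Str.len raw_model - PySem.Str.len reg_id
    if prefix_len = 0 ∨ PySem.Str.pyGet? raw_model (prefix_len - 1) = some '/' then
      match best with
      | none => some reg_id
      | some b => if PySem.Str.len reg_id > PySem.Str.len b then some reg_id else best
    else best
  else best

def resolve_model_id (raw_model : String) (registry : List (String × String)) : Option String :=
  let d := PySem.Dict.ofList registry
  if d.contains raw_model then some raw_model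
  else d.keys.foldl (pvStepA raw_model) none

-- ===== PORT B =====
-- B's loop over enumerate(raw_model).
def pvLoopB (raw_model : String) (d : PySem.Dict String String) : List (Int × Char) → Option String
  | [] => none
  | (i, ch) :: rest =>
    if ch = '/' then
      let cand := PySem.Str.slice raw_model (some (i + 1)) none
      if d.contains cand then some cand else pvLoopB raw_model d rest
    else pvLoopB raw_model d rest

def resolve_model_id_alt (raw_model : String) (registry : List (String × String)) : Option String :=
  let d := PySem.Dict.ofList registry
  if d.contains raw_model then some raw_model
  else pvLoopB raw_model d (PySem.List.enumerate raw_model.toList 0)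

-- ===== PRECONDITION & SPEC =====
def Spec_resolve_model_id (raw_model : String) (registry : List (String × String)) (out : Option String) : Prop := out = resolve_model_id_alt raw_model registry
instance (raw_model : String) (registry : List (String × String)) (out : Option String) : Decidable (Spec_resolve_model_id raw_model registry out) := by unfold Spec_resolve_model_id; infer_instance

-- ===== CLAIM (what is proved, stated in full; the proofs are below) =====
def Claim_equal_resolve_model_id : Prop := ∀ (raw_model : String) (registry : List (String × String)), Dom_resolve_model_id raw_model registry → Spec_resolve_model_id raw_model registry (resolve_model_id raw_model registry)

-- ===== LEMMAS AND PROOFS =====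

-- The condition under which A's loop body replaces/keeps a candidate.
def pvGood (raw k : String) : Prop :=
  PySem.Str.endswith raw k = true ∧
  (PySem.Str.len raw - PySem.Str.len k = 0 ∨
   PySem.Str.pyGet? raw (PySem.Str.len raw - PySem.Str.len k - 1) = some '/')

-- Position n of raw is a '/' whose following suffix is a registry key.
def pvHit (L : List Char) (ks : List String) (n : Nat) : Prop :=
  L[n]? = some '/' ∧ String.ofList (L.drop (n + 1)) ∈ ks

lemma pvStepA_pos (raw : String) (best : Option String) (k : String) (hg : pvGood raw k) :
    pvStepA raw best k =
      match best with
      | none => some k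
      | some b => if PySem.Str.len k > PySem.Str.len b then some k else best := by
  unfold pvStepA pvGood at *
  split_ifs with h1 h2 <;> simp_all

lemma pvStepA_neg (raw : String) (best : Option String) (k : String) (hg : ¬ pvGood raw k) :
    pvStepA raw best k = best := by
  unfold pvStepA pvGood at *
  split_ifs with h1 h2 <;> simp_all

lemma pvFoldA_char (raw : String) (ks : List String) (acc : Option String)
    (hacc : ∀ b, acc = some b → pvGood raw b) :
    (∀ b, ks.foldl (pvStepA raw) acc = some b → pvGood raw b ∧ (b ∈ ks ∨ acc = some b)) ∧
    (∀ k ∈ ks, pvGood raw k → ∃ b, ks.foldl (pvStepA raw) acc = some b ∧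
        PySem.Str.len k ≤ PySem.Str.len b) ∧
    (∀ b, acc = some b → ∃ b', ks.foldl (pvStepA raw) acc = some b' ∧
        PySem.Str.len b ≤ PySem.Str.len b') := by
  induction ks generalizing acc with
  | nil =>
    refine ⟨fun b h => ⟨hacc b h, Or.inr h⟩, by simp, fun b h => ⟨b, h, le_refl _⟩⟩
  | cons k ks ih =>
    have hstep : ∀ b, pvStepA raw acc k = some b → pvGood raw b ∧ (b = k ∨ acc = some b) := by
      intro b hb
      by_cases hg : pvGood raw k
      · rw [pvStepA_pos _ _ _ hg] at hb
        cases acc with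
        | none => cases hb; exact ⟨hg, Or.inl rfl⟩
        | some a =>
          have hb' : (if PySem.Str.len k > PySem.Str.len a then some k else some a) = some b := hb
          by_cases hl : PySem.Str.len k > PySem.Str.len a
          · rw [if_pos hl] at hb'; cases hb'; exact ⟨hg, Or.inl rfl⟩
          · rw [if_neg hl] at hb'; cases hb'; exact ⟨hacc _ rfl, Or.inr rfl⟩
      · rw [pvStepA_neg _ _ _ hg] at hb; exact ⟨hacc b hb, Or.inr hb⟩
    have hmono : ∀ b, acc = some b → ∃ b', pvStepA raw acc k = some b' ∧
        PySem.Str.len b ≤ PySem.Str.len b' := by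
      intro b hb
      subst hb
      by_cases hg : pvGood raw k
      · rw [pvStepA_pos _ _ _ hg]
        by_cases hl : PySem.Str.len k > PySem.Str.len b
        · exact ⟨k, if_pos hl, le_of_lt hl⟩
        · exact ⟨b, if_neg hl, le_refl _⟩
      · rw [pvStepA_neg _ _ _ hg]; exact ⟨b, rfl, le_refl _⟩
    have hk : pvGood raw k → ∃ b, pvStepA raw acc k = some b ∧
        PySem.Str.len k ≤ PySem.Str.len b := by
      intro hg
      rw [pvStepA_pos _ _ _ hg]
      cases acc with
      | none => exact ⟨k, rfl, le_refl _⟩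
      | some a =>
        by_cases hl : PySem.Str.len k > PySem.Str.len a
        · exact ⟨k, if_pos hl, le_refl _⟩
        · exact ⟨a, if_neg hl, by omega⟩
    have ih' := ih (pvStepA raw acc k) (fun b h => (hstep b h).1)
    refine ⟨?_, ?_, ?_⟩
    · intro b hb
      have := ih'.1 b (by simpa using hb)
      rcases this with ⟨hg, hin | heq⟩
      · exact ⟨hg, Or.inl (List.mem_cons_of_mem _ hin)⟩
      · rcases hstep b heq with ⟨_, hbk | hba⟩
        · exact ⟨hg, Or.inl (by simp [hbk])⟩
        · exact ⟨hg, Or.inr hba⟩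
    · intro k' hk' hg'
      rcases List.mem_cons.mp hk' with rfl | hk'
      · rcases hk hg' with ⟨b, hb, hlen⟩
        rcases ih'.2.2 b hb with ⟨b', hb', hlen'⟩
        exact ⟨b', by simpa using hb', le_trans hlen hlen'⟩
      · rcases ih'.2.1 k' hk' hg' with ⟨b, hb, hlen⟩
        exact ⟨b, by simpa using hb, hlen⟩
    · intro b hb
      rcases hmono b hb with ⟨b', hb', hlen⟩
      rcases ih'.2.2 b' hb' with ⟨b'', hb'', hlen'⟩
      exact ⟨b'', by simpa using hb'', le_trans hlen hlen'⟩

lemma pvSlice_eq (raw : String) (j : Nat) :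
    PySem.Str.slice raw (some ((j : Int) + 1)) none = String.ofList (raw.toList.drop (j + 1)) := by
  have h1 : ((j : Int) + 1) = ((j + 1 : Nat) : Int) := by push_cast; ring
  rw [h1]
  show String.ofList (PySem.List.slice raw.toList (some ((j + 1 : Nat) : Int)) none) = _
  rw [PySem.List.slice_from_natCast]

lemma pvLoopB_cons (raw : String) (d : PySem.Dict String String) (i : Int) (ch : Char)
    (rest : List (Int × Char)) :
    pvLoopB raw d ((i, ch) :: rest) =
      if ch = '/' then
        (if d.contains (PySem.Str.slice raw (some (i + 1)) none) then
          some (PySem.Str.slice raw (some (i + 1)) none)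
        else pvLoopB raw d rest)
      else pvLoopB raw d rest := rfl

lemma pvLoopB_char (raw : String) (d : PySem.Dict String String) (fuel j : Nat)
    (hfuel : raw.toList.length - j ≤ fuel) :
    (pvLoopB raw d (PySem.List.enumerate (raw.toList.drop j) j) = none ∧
      ∀ n, j ≤ n → ¬ pvHit raw.toList d.keys n) ∨
    (∃ n, j ≤ n ∧ pvHit raw.toList d.keys n ∧
      pvLoopB raw d (PySem.List.enumerate (raw.toList.drop j) j)
        = some (String.ofList (raw.toList.drop (n + 1))) ∧
      ∀ m, j ≤ m → m < n → ¬ pvHit raw.toList d.keys m) := by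
  induction fuel generalizing j with
  | zero =>
    have hj : raw.toList.length ≤ j := by omega
    left
    constructor
    · rw [List.drop_eq_nil_of_le hj]; rfl
    · intro n _ ⟨h1, _⟩
      obtain ⟨hlt, -⟩ := List.getElem?_eq_some_iff.mp h1
      omega
  | succ fuel ih =>
    by_cases hj : j < raw.toList.length
    · have hdrop : raw.toList.drop j = raw.toList[j] :: raw.toList.drop (j + 1) :=
        List.drop_eq_getElem_cons hj
      rw [hdrop, PySem.List.enumerate_cons]
      by_cases hch : raw.toList[j] = '/'
      · by_cases hcand : d.contains (String.ofList (raw.toList.drop (j + 1))) = true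
        · right
          refine ⟨j, le_refl _, ⟨by rw [List.getElem?_eq_getElem hj, hch], (PySem.Dict.contains_iff_mem_keys _ _).mp hcand⟩, ?_, ?_⟩
          · rw [pvLoopB_cons]
            simp [hch, pvSlice_eq, hcand]
          · intro m h1 h2; omega
        · have hrec : pvLoopB raw d (((j : Int), raw.toList[j]) :: PySem.List.enumerate (raw.toList.drop (j + 1)) ((j : Int) + 1))
              = pvLoopB raw d (PySem.List.enumerate (raw.toList.drop (j + 1)) ((j : Int) + 1)) := by
            rw [pvLoopB_cons]
            simp [hch, pvSlice_eq, hcand]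
          have hnotj : ¬ pvHit raw.toList d.keys j := by
            intro ⟨_, h2⟩
            exact hcand ((PySem.Dict.contains_iff_mem_keys _ _).mpr h2)
          have : ((j : Int) + 1) = ((j + 1 : Nat) : Int) := by push_cast; ring
          rw [hrec, this]
          rcases ih (j + 1) (by omega) with ⟨h0, hno⟩ | ⟨n, hn1, hn2, hn3, hn4⟩
          · left
            refine ⟨h0, fun n hn => ?_⟩
            rcases Nat.eq_or_lt_of_le hn with rfl | hlt
            · exact hnotj
            · exact hno n hlt
          · right
            refine ⟨n, by omega, hn2, hn3, fun m hm1 hm2 => ?_⟩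
            rcases Nat.eq_or_lt_of_le hm1 with rfl | hlt
            · exact hnotj
            · exact hn4 m hlt hm2
      · have hrec : pvLoopB raw d (((j : Int), raw.toList[j]) :: PySem.List.enumerate (raw.toList.drop (j + 1)) ((j : Int) + 1))
            = pvLoopB raw d (PySem.List.enumerate (raw.toList.drop (j + 1)) ((j : Int) + 1)) := by
          rw [pvLoopB_cons]
          simp [hch]
        have hnotj : ¬ pvHit raw.toList d.keys j := by
          intro ⟨h1, _⟩
          rw [List.getElem?_eq_getElem hj] at h1
          exact hch (Option.some_injective _ h1)
        have : ((j : Int) + 1) = ((j + 1 : Nat) : Int) := by push_cast; ring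
        rw [hrec, this]
        rcases ih (j + 1) (by omega) with ⟨h0, hno⟩ | ⟨n, hn1, hn2, hn3, hn4⟩
        · left
          refine ⟨h0, fun n hn => ?_⟩
          rcases Nat.eq_or_lt_of_le hn with rfl | hlt
          · exact hnotj
          · exact hno n hlt
        · right
          refine ⟨n, by omega, hn2, hn3, fun m hm1 hm2 => ?_⟩
          rcases Nat.eq_or_lt_of_le hm1 with rfl | hlt
          · exact hnotj
          · exact hn4 m hlt hm2
    · left
      constructor
      · rw [List.drop_eq_nil_of_le (by omega)]; rfl
      · intro n hn ⟨h1, _⟩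
        obtain ⟨hlt, -⟩ := List.getElem?_eq_some_iff.mp h1
        omega

lemma pvGood_to_hit (raw k : String) (ks : List String) (hk : k ∈ ks) (hne : k ≠ raw)
    (hg : pvGood raw k) :
    k.toList.length < raw.toList.length ∧
    pvHit raw.toList ks (raw.toList.length - k.toList.length - 1) ∧
    k.toList = raw.toList.drop (raw.toList.length - k.toList.length) := by
  obtain ⟨hsuf, hbd⟩ := hg
  rw [PySem.Str.endswith_eq, PySem.Chars.endswith_iff] at hsuf
  have hlen : k.toList.length ≤ raw.toList.length := hsuf.length_le
  have hne' : k.toList.length ≠ raw.toList.length := by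
    intro he
    exact hne (by
      have := List.IsSuffix.eq_of_length hsuf he
      calc k = String.ofList k.toList := by simp
        _ = String.ofList raw.toList := by rw [this]
        _ = raw := by simp)
  have hlt : k.toList.length < raw.toList.length := lt_of_le_of_ne hlen hne'
  have hdrop : k.toList = raw.toList.drop (raw.toList.length - k.toList.length) :=
    List.suffix_iff_eq_drop.mp hsuf
  rcases hbd with h0 | hsl
  · exfalso
    simp only [PySem.Str.len_eq] at h0
    omega
  · refine ⟨hlt, ⟨?_, ?_⟩, hdrop⟩
    · have hcast : PySem.Str.len raw - PySem.Str.len k - 1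
          = ((raw.toList.length - k.toList.length - 1 : Nat) : Int) := by
        simp only [PySem.Str.len_eq]; omega
      rw [hcast, PySem.Str.pyGet?_natCast] at hsl
      exact hsl
    · have : raw.toList.length - k.toList.length - 1 + 1
          = raw.toList.length - k.toList.length := by omega
      rw [this, ← hdrop]
      simpa using hk
  
lemma pvHit_to_good (raw : String) (ks : List String) (n : Nat)
    (h : pvHit raw.toList ks n) :
    pvGood raw (String.ofList (raw.toList.drop (n + 1))) ∧
    (String.ofList (raw.toList.drop (n + 1))).toList.length = raw.toList.length - (n + 1) := by
  obtain ⟨h1, _⟩ := h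
  have hn : n < raw.toList.length := (List.getElem?_eq_some_iff.mp h1).1
  have hlen : (String.ofList (raw.toList.drop (n + 1))).toList.length
      = raw.toList.length - (n + 1) := by simp
  refine ⟨⟨?_, Or.inr ?_⟩, hlen⟩
  · rw [PySem.Str.endswith_eq, PySem.Chars.endswith_iff]
    simpa using List.drop_suffix (n + 1) raw.toList
  · have hcast : PySem.Str.len raw - PySem.Str.len (String.ofList (raw.toList.drop (n + 1))) - 1
        = ((n : Nat) : Int) := by
      simp only [PySem.Str.len_eq, hlen]; omega
    rw [hcast, PySem.Str.pyGet?_natCast]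
    exact h1

-- ===== VERDICT (by name: the statement is the Claim_ definition above) =====
theorem resolve_model_id_spec : Claim_equal_resolve_model_id := by
  intro raw registry _
  unfold Spec_resolve_model_id resolve_model_id resolve_model_id_alt
  by_cases hc : (PySem.Dict.ofList registry).contains raw = true
  · simp [hc]
  · rw [if_neg hc, if_neg hc]
    set d := PySem.Dict.ofList registry with hd
    have hraw : raw ∉ d.keys := fun hm => hc ((PySem.Dict.contains_iff_mem_keys _ _).mpr hm)
    have hA := pvFoldA_char raw d.keys none (by simp)
    have hB := pvLoopB_char raw d raw.toList.length 0 (by omega)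
    rw [List.drop_zero] at hB
    simp only [Nat.cast_zero] at hB
    rcases hB with ⟨hB0, hno⟩ | ⟨n, _, hhit, hBsome, hmin⟩
    · rw [hB0]
      cases hfold : d.keys.foldl (pvStepA raw) none with
      | none => rfl
      | some b =>
        exfalso
        rcases hA.1 b hfold with ⟨hg, hin | habs⟩
        · have hbne : b ≠ raw := fun he => hraw (he ▸ hin)
          rcases pvGood_to_hit raw b d.keys hin hbne hg with ⟨_, hhit, _⟩
          exact hno _ (Nat.zero_le _) hhit
        · simp at habs
    · rw [hBsome]
      obtain ⟨hn, -⟩ := List.getElem?_eq_some_iff.mp hhit.1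
      rcases pvHit_to_good raw d.keys n hhit with ⟨hgood, hslen⟩
      rcases hA.2.1 _ hhit.2 hgood with ⟨b, hfold, hblen⟩
      rcases hA.1 b hfold with ⟨hbg, hbin | habs⟩
      swap
      · simp at habs
      have hbne : b ≠ raw := fun he => hraw (he ▸ hbin)
      rcases pvGood_to_hit raw b d.keys hbin hbne hbg with ⟨hblt, hbhit, hbdrop⟩
      have hlen' : raw.toList.length - (n + 1) ≤ b.toList.length := by
        simp only [PySem.Str.len_eq, hslen] at hblen
        omega
      have hle : raw.toList.length - b.toList.length - 1 ≤ n := by omega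
      have hge : n ≤ raw.toList.length - b.toList.length - 1 := by
        by_contra hlt
        exact hmin _ (Nat.zero_le _) (by omega) hbhit
      have heq : raw.toList.length - b.toList.length = n + 1 := by omega
      rw [hfold]
      have : b.toList = raw.toList.drop (n + 1) := by rw [hbdrop, heq]
      calc some b = some (String.ofList b.toList) := by simp
        _ = some (String.ofList (raw.toList.drop (n + 1))) := by rw [this]
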